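-- pv_equiv track=rewrite | github.com/adjl/CompetitiveProgramming | General/hash_table.py | gen_collisions
-- ===== SOURCE A (Python) =====
-- def hc(s):
--     hash_code = 0
--     for i in s:
--         hash_code = (hash_code * 29 + ord(i)) % 2048
--     return hash_code
--
-- def gen_collisions(s):
--     for i in range(26):
--         for j in range(26):
--             for k in range(26):
--                 word = chr(i + ord('a')) + \
--                     chr(j + ord('a')) + chr(k + ord('a'))
--                 if hc(word) == hc(s):
--                     return word
-- ===== SOURCE B (Python) =====
-- def hc(s):
--     hash_code = 0
--     for i in s:
--         hash_code = (hash_code * 29 + ord(i)) % 2048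
--     return hash_code
--
-- def gen_collisions(s):
--     target = hc(s)
--     for i in range(26):
--         for j in range(26):
--             needed = (target - (i + 97) * 841 - (j + 97) * 29) % 2048
--             if 97 <= needed <= 122:
--                 return chr(i + 97) + chr(j + 97) + chr(needed)
-- ===== Notes on version B (the rewrite author's own statement) =====
-- stated objective: faster
-- what changed: B computes hc(s) once and, for each (i,j) prefix, solves algebraically for the third letter modulo 2048 instead of scanning all 26 candidates and recomputing hc(s) in the innermost loop.
import Mathlib
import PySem

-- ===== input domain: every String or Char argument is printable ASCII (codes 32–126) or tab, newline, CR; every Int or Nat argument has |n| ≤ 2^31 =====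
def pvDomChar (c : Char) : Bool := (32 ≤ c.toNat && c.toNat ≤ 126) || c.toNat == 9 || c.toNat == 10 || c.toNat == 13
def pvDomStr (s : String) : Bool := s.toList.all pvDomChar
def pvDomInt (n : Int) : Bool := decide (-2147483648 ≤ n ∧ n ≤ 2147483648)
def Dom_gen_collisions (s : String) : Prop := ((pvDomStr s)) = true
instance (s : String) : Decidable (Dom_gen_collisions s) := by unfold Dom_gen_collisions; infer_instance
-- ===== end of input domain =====

-- B computes hc(s) once and solves algebraically for the third letter, removing the innermost
-- 26-way scan and A's per-iteration recomputation of hc(s) (objective: faster).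


-- ===== PORT A =====
-- helper hc, shared verbatim by Source A and Source B
def hc (s : String) : Int :=
  s.toList.foldl (fun h c => (h * 29 + (c.toNat : Int)) % 2048) 0

def gen_collisions (s : String) : Option String :=
  (List.range 26).findSome? (fun (i : ℕ) =>
    (List.range 26).findSome? (fun (j : ℕ) =>
      (List.range 26).findSome? (fun k =>
        let word := String.ofList [Char.ofNat (i + 97), Char.ofNat (j + 97), Char.ofNat (k + 97)]
        if hc word = hc s then some word else none)))

-- ===== PORT B =====
def gen_collisions_alt (s : String) : Option String :=
  let target := hc s
  (List.range 26).findSome? (fun (i : ℕ) =>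
    (List.range 26).findSome? (fun (j : ℕ) =>
      let needed := (target - ((i : Int) + 97) * 841 - ((j : Int) + 97) * 29) % 2048
      if 97 ≤ needed ∧ needed ≤ 122 then
        some (String.ofList [Char.ofNat (i + 97), Char.ofNat (j + 97), Char.ofNat needed.toNat])
      else none))

-- ===== PRECONDITION & SPEC =====
def Spec_gen_collisions (s : String) (out : Option String) : Prop := out = gen_collisions_alt s
instance (s : String) (out : Option String) : Decidable (Spec_gen_collisions s out) := by unfold Spec_gen_collisions; infer_instance

-- ===== CLAIM (what is proved, stated in full; the proofs are below) =====
def Claim_equal_gen_collisions : Prop := ∀ (s : String), Dom_gen_collisions s → Spec_gen_collisions s (gen_collisions s)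

-- ===== LEMMAS AND PROOFS =====

theorem hc_bounds (s : String) : 0 ≤ hc s ∧ hc s < 2048 := by
  unfold hc
  induction s.toList using List.reverseRecOn with
  | nil => simp
  | append_singleton l c _ =>
      simp only [List.foldl_append, List.foldl_cons, List.foldl_nil]
      constructor
      · exact Int.emod_nonneg _ (by norm_num)
      · exact Int.emod_lt_of_pos _ (by norm_num)

theorem findSome?_congr {α β : Type} (l : List α) (f g : α → Option β)
    (h : ∀ x ∈ l, f x = g x) : l.findSome? f = l.findSome? g := by
  induction l with
  | nil => rfl
  | cons a l ih =>
      simp only [List.findSome?_cons, h a (by simp)]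
      cases g a with
      | some v => rfl
      | none => exact ih (fun x hx => h x (by simp [hx]))

theorem toNat_ofNat_small (n : ℕ) (h : n < 55296) : (Char.ofNat n).toNat = n := by
  rw [Char.toNat_ofNat, if_pos]
  exact Or.inl h

theorem hc_word (i j k : ℕ) (hi : i < 26) (hj : j < 26) (hk : k < 26) :
    hc (String.ofList [Char.ofNat (i + 97), Char.ofNat (j + 97), Char.ofNat (k + 97)])
      = ((i : Int) + 97) * 841 + ((j : Int) + 97) * 29 + ((k : Int) + 97)
          - 2048 * ((((i : Int) + 97) * 841 + ((j : Int) + 97) * 29 + ((k : Int) + 97)) / 2048) := by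
  unfold hc
  simp only [String.toList_ofList, List.foldl_cons, List.foldl_nil,
    toNat_ofNat_small (i + 97) (by omega), toNat_ofNat_small (j + 97) (by omega),
    toNat_ofNat_small (k + 97) (by omega)]
  omega

-- findSome? over range n of a function matching only at k0 < n returns its value at k0
theorem findSome?_range_unique {β : Type} (n k0 : ℕ) (v : β) (f : ℕ → Option β)
    (hk : k0 < n) (h : ∀ k, k < n → f k = if k = k0 then some v else none) :
    (List.range n).findSome? f = some v := by
  induction n with
  | zero => omega
  | succ n ih =>
      rw [List.range_succ, List.findSome?_append]
      by_cases hlt : k0 < n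
      · rw [ih hlt (fun k hkn => h k (by omega))]; rfl
      · have hk0 : k0 = n := by omega
        have hnone : (List.range n).findSome? f = none := by
          rw [List.findSome?_eq_none_iff]
          intro k hkm
          have hkn : k < n := List.mem_range.mp hkm
          rw [h k (by omega), if_neg (by omega)]
        rw [hnone]
        simp [h n (by omega), hk0]

-- the inner k-loop of A equals B's algebraic solve, for fixed i, j and target t = hc s
theorem inner_eq (i j : ℕ) (hi : i < 26) (hj : j < 26) (t : Int)
    (ht0 : 0 ≤ t) (ht1 : t < 2048) :
    (List.range 26).findSome? (fun k =>
        if hc (String.ofList [Char.ofNat (i + 97), Char.ofNat (j + 97), Char.ofNat (k + 97)]) = t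
        then some (String.ofList [Char.ofNat (i + 97), Char.ofNat (j + 97), Char.ofNat (k + 97)])
        else none)
      = (if 97 ≤ (t - ((i : Int) + 97) * 841 - ((j : Int) + 97) * 29) % 2048 ∧
            (t - ((i : Int) + 97) * 841 - ((j : Int) + 97) * 29) % 2048 ≤ 122 then
          some (String.ofList [Char.ofNat (i + 97), Char.ofNat (j + 97),
            Char.ofNat ((t - ((i : Int) + 97) * 841 - ((j : Int) + 97) * 29) % 2048).toNat])
        else none) := by
  set nd : Int := (t - ((i : Int) + 97) * 841 - ((j : Int) + 97) * 29) % 2048 with hnd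
  have hnd0 : 0 ≤ nd := Int.emod_nonneg _ (by norm_num)
  have hnd1 : nd < 2048 := Int.emod_lt_of_pos _ (by norm_num)
  have hcond : ∀ k : ℕ, k < 26 →
      (hc (String.ofList [Char.ofNat (i + 97), Char.ofNat (j + 97), Char.ofNat (k + 97)]) = t
        ↔ ((k : Int) + 97 = nd)) := by
    intro k hk
    rw [hc_word i j k hi hj hk, hnd]
    omega
  by_cases hin : 97 ≤ nd ∧ nd ≤ 122
  · rw [if_pos hin]
    have hknat : nd.toNat - 97 < 26 := by omega
    have hval : ((nd.toNat - 97 : ℕ) : Int) + 97 = nd := by omega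
    have hch : (nd.toNat - 97) + 97 = nd.toNat := by omega
    apply findSome?_range_unique 26 (nd.toNat - 97) _ _ hknat
    intro k hk
    by_cases hkeq : k = nd.toNat - 97
    · subst hkeq
      rw [if_pos rfl, if_pos ((hcond _ hk).mpr hval), hch]
    · rw [if_neg hkeq, if_neg]
      intro hcnd
      exact hkeq (by have := (hcond k hk).mp hcnd; omega)
  · rw [if_neg hin, List.findSome?_eq_none_iff]
    intro k hkm
    have hk : k < 26 := List.mem_range.mp hkm
    rw [if_neg]
    intro hcnd
    have := (hcond k hk).mp hcnd
    omega

-- ===== VERDICT (by name: the statement is the Claim_ definition above) =====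
theorem gen_collisions_spec : Claim_equal_gen_collisions := by
  intro s _
  unfold Spec_gen_collisions gen_collisions gen_collisions_alt
  obtain ⟨ht0, ht1⟩ := hc_bounds s
  apply findSome?_congr
  intro i hi
  apply findSome?_congr
  intro j hj
  exact inner_eq i j (List.mem_range.mp hi) (List.mem_range.mp hj) (hc s) ht0 ht1
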